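-- pv_equiv track=rewrite | github.com/BarkoAgent/BAwebAutomationAgent | agent_func.py | _expand_charset
-- ===== SOURCE A (Python) =====
-- def _expand_charset(spec):
--     """Return list of chars for a bracket charset like a-zA-Z0-9_."""
--     chars = []
--     i = 0
--     L = len(spec)
--     while i < L:
--         if i + 2 < L and spec[i+1] == '-':
--             start = spec[i]
--             end = spec[i+2]
--             chars.extend([chr(c) for c in range(ord(start), ord(end)+1)])
--             i += 3
--         else:
--             chars.append(spec[i])
--             i += 1
--     return chars
-- ===== SOURCE B (Python) =====
-- import re
--
-- def _expand_charset(spec):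
--     """Return list of chars for a bracket charset like a-zA-Z0-9_."""
--     chars = []
--     for m in re.finditer(r'(.)-(.)|(.)', spec, re.DOTALL):
--         g1, g2, g3 = m.groups()
--         if g3 is None:
--             chars.extend(chr(c) for c in range(ord(g1), ord(g2) + 1))
--         else:
--             chars.append(g3)
--     return chars
-- ===== Notes on version B (the rewrite author's own statement) =====
-- stated objective: idiomatic
-- what changed: Replaced the manual index-arithmetic while-loop with a single regex pass (re.finditer(r'(.)-(.)|(.)', spec, re.DOTALL)) whose greedy left-to-right tokenization yields the range/single-char cases directly.
import Mathlib
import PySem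

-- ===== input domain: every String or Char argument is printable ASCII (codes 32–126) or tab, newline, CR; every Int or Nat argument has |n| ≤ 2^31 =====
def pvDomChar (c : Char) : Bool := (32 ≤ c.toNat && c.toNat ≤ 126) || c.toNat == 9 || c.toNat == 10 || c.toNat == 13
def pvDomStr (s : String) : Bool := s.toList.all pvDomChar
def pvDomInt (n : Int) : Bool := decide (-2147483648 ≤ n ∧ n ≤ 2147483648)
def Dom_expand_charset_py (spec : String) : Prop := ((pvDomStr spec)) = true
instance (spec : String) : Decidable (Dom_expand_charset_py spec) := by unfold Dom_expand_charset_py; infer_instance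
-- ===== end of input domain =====

-- B replaces A's index-arithmetic while-loop with a regex-style left-to-right tokenizer
-- (in Lean: structural recursion on the char list); same values, idiomatic restructuring.

-- ===== PORT A =====
-- A's index loop over spec; chars.extend([chr(c) for c in range(ord(start), ord(end)+1)])
def expand_charset_py_loop (cs : List Char) (i : Nat) : List String :=
  if _h : i < cs.length then
    if i + 2 < cs.length ∧ cs.getD (i+1) ' ' = '-' then
      ((PySem.List.pyRange ((cs.getD i ' ').toNat : Int) (((cs.getD (i+2) ' ').toNat : Int) + 1) 1).map
        (fun c => (Char.ofNat c.toNat).toString)) ++ expand_charset_py_loop cs (i + 3)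
    else
      (cs.getD i ' ').toString :: expand_charset_py_loop cs (i + 1)
  else []
termination_by cs.length - i

def expand_charset_py (spec : String) : List String :=
  expand_charset_py_loop spec.toList 0

-- ===== PORT B =====
-- B's regex tokenization r'(.)-(.)|(.)' as structural recursion: a range token or a single char.
def expand_charset_py_alt_go : List Char → List String
  | a :: b :: c :: rest =>
      if b = '-' then
        ((List.range (c.toNat + 1 - a.toNat)).map
          (fun k => (Char.ofNat (a.toNat + k)).toString)) ++ expand_charset_py_alt_go rest
      else a.toString :: expand_charset_py_alt_go (b :: c :: rest)
  | c :: rest => c.toString :: expand_charset_py_alt_go rest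
  | [] => []

def expand_charset_py_alt (spec : String) : List String :=
  expand_charset_py_alt_go spec.toList

-- ===== PRECONDITION & SPEC =====
def Spec_expand_charset_py (spec : String) (out : List String) : Prop := out = expand_charset_py_alt spec
instance (spec : String) (out : List String) : Decidable (Spec_expand_charset_py spec out) := by unfold Spec_expand_charset_py; infer_instance

-- ===== CLAIM (what is proved, stated in full; the proofs are below) =====
def Claim_equal_expand_charset_py : Prop := ∀ (spec : String), Dom_expand_charset_py spec → Spec_expand_charset_py spec (expand_charset_py spec)

-- ===== LEMMAS AND PROOFS =====

-- the two range-emission forms coincide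
lemma range_emit_eq (a b : Char) :
    ((PySem.List.pyRange ((a.toNat : Int)) ((b.toNat : Int) + 1) 1).map
        (fun c => (Char.ofNat c.toNat).toString))
      = (List.range (b.toNat + 1 - a.toNat)).map (fun k => (Char.ofNat (a.toNat + k)).toString) := by
  rw [PySem.List.pyRange_one]
  rw [List.map_map]
  have hlen : (((b.toNat : Int) + 1) - (a.toNat : Int)).toNat = b.toNat + 1 - a.toNat := by omega
  rw [hlen]
  apply List.map_congr_left
  intro k _
  have hcast : (((a.toNat : Int)) + (k : Int)).toNat = a.toNat + k := by omega
  simp [Function.comp, hcast]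

lemma loop_eq_go (cs : List Char) (i : Nat) :
    expand_charset_py_loop cs i = expand_charset_py_alt_go (cs.drop i) := by
  have main : ∀ n i, cs.length - i ≤ n →
      expand_charset_py_loop cs i = expand_charset_py_alt_go (cs.drop i) := by
    intro n
    induction n with
    | zero =>
      intro i h
      have hi : ¬ i < cs.length := by omega
      rw [expand_charset_py_loop, dif_neg hi, List.drop_eq_nil_of_le (by omega)]
      rfl
    | succ n ih =>
      intro i h
      by_cases hi : i < cs.length
      · rw [List.drop_eq_getElem_cons hi]
        by_cases hg : i + 2 < cs.length ∧ cs.getD (i+1) ' ' = '-'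
        · obtain ⟨h2, hdash⟩ := hg
          have h1 : i + 1 < cs.length := by omega
          have hd1 : cs[i+1] = '-' := by
            rw [← List.getD_eq_getElem cs ' ' h1]; exact hdash
          rw [List.drop_eq_getElem_cons h1, List.drop_eq_getElem_cons h2, hd1]
          rw [expand_charset_py_loop, dif_pos hi, if_pos ⟨h2, hdash⟩]
          rw [List.getD_eq_getElem cs ' ' hi, List.getD_eq_getElem cs ' ' h2]
          rw [ih (i+3) (by omega), range_emit_eq]
          rw [expand_charset_py_alt_go, if_pos rfl]
        · rw [expand_charset_py_loop, dif_pos hi, if_neg hg,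
              List.getD_eq_getElem cs ' ' hi, ih (i+1) (by omega)]
          rcases hd1 : cs.drop (i+1) with _ | ⟨x, _ | ⟨y, t⟩⟩
          · rfl
          · rfl
          · have hlen : 2 ≤ cs.length - (i+1) := by
              have := congrArg List.length hd1
              simp [List.length_drop] at this; omega
            have h2 : i + 2 < cs.length := by omega
            have h1 : i + 1 < cs.length := by omega
            have hx : x = cs[i+1] := by
              have := List.drop_eq_getElem_cons h1 (l := cs)
              rw [hd1] at this
              exact (List.cons.injEq _ _ _ _ ▸ this).1
            have hxne : x ≠ '-' := by
              intro hxd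
              exact hg ⟨h2, by rw [List.getD_eq_getElem cs ' ' h1, ← hx, hxd]⟩
            rw [expand_charset_py_alt_go, if_neg hxne]
      · rw [expand_charset_py_loop, dif_neg hi, List.drop_eq_nil_of_le (by omega)]
        rfl
  exact main (cs.length - i) i le_rfl

-- ===== VERDICT (by name: the statement is the Claim_ definition above) =====
theorem expand_charset_py_spec : Claim_equal_expand_charset_py := by
  intro spec _
  unfold Spec_expand_charset_py expand_charset_py expand_charset_py_alt
  simpa using loop_eq_go spec.toList 0
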